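-- pv_equiv track=rewrite | github.com/gambler147/google-code-jam | 2021QualificationRound/MoonsAndUmbrellas/Solution.py | solve
-- ===== SOURCE A (Python) =====
-- def solve(X,Y,S):
--   """
--   return minimum cost of Cody-Jamal's copyrights payment
--
--   count number of '?'s for each group, for X > 0 and Y > 0 cases, it's trivial:
--   we only need to count number of changes from S to J and J to S
--
--   if X + Y < 0, its always optimal to alternate S and J
--   """
--   n = len(S)
--   prev = None
--   cost = [X, Y] # cost of transitioning from C to J and J to C respectively
--   res = 0
--   z = 0 # counter for '?'s
--   for i in range(n):
--     if S[i] in ['C', 'J']: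
--       cur = 0 if S[i] == 'C' else 1
--       # switch cases
--       if X + Y >= 0:
--         # not optimal to alternate, keep all ?s same in the group
--         # but if prev is None and cost[1-cur] < 0, we can make profit in prefix
--         if prev is None and cost[1-cur] < 0 and z > 0:
--           res += cost[1-cur]
--         elif prev is not None and prev != cur:
--           res += cost[prev]
--       else:
--         # X + Y < 0:
--         # it is always optimal to alternate
--         # but be careful when ? exisits in prefix
--         if prev is not None:
--           res += cost[prev] * ((z+(prev!=cur)+1)//2) + cost[1-prev] * ((z+(prev==cur))//2)
--         else:
--           res += cost[cur] * (z//2) + cost[1-cur] * ((1+z)//2)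
--           if cost[cur] > 0 and z > 0 and z%2 == 0:
--             # if prev is none and cost[cur] > 0 and we have even number of ?s
--             # we subtract one cost[cur]
--             res -= cost[cur]
--           elif cost[1-cur] > 0 and z%2 == 1:
--             res -= cost[1-cur]
--       z = 0
--       prev = cur
--     else:
--       z += 1
--
--   # handle suffix ? case
--   if z > 0:
--     if prev is None:
--       # the whole string consists of ?
--       if X + Y >= 0:
--         if X < 0 and z > 1:
--           res = X
--         elif Y < 0 and z > 1:
--           res = Y
--         else:
--           res = 0
--       else:
--         # X + Y < 0
--         X, Y = min(X,Y), max(X,Y)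
--         res = X * (z//2) + Y * ((z-1)//2)
--         if Y > 0 and z%2 == 0:
--           res -= Y
--     else:
--       # prev is not None
--       if X+Y >= 0:
--         # check if cost[prev] < 0
--         if cost[prev] < 0:
--           res += cost[prev]
--       else:
--         # X+Y < 0
--         res += cost[prev] * ((z+1)//2) + cost[1-prev] * (z//2)
--         if cost[prev] > 0:
--           res -= cost[prev]
--         elif cost[1-prev] > 0 and z%2 == 0:
--           res -= cost[1-prev]
--
--   return res
-- ===== SOURCE B (Python) =====
-- def solve(X, Y, S):
--     """Standard two-state DP: minimal total cost of C->J (X) and J->C (Y)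
--     transitions over all assignments of the free positions (None = infeasible)."""
--     def add(a, b):
--         return None if a is None else a + b
--     def mn(a, b):
--         if a is None:
--             return b
--         if b is None:
--             return a
--         return min(a, b)
--     c = j = None
--     first = True
--     for ch in S:
--         if first:
--             c = None if ch == 'J' else 0
--             j = None if ch == 'C' else 0
--             first = False
--         else:
--             nc = mn(c, add(j, Y))
--             nj = mn(j, add(c, X))
--             if ch == 'C':
--                 nj = None
--             elif ch == 'J':
--                 nc = None
--             c, j = nc, nj
--     if first:
--         return 0
--     return mn(c, j)
-- ===== Notes on version B (the rewrite author's own statement) =====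
-- stated objective: simpler
-- what changed: Replaced A's case-heavy greedy closed-form (group counters, sign/parity corrections, special prefix/suffix branches) with the standard two-state dynamic program over the string.
-- intended difference: When X+Y<0 and the string ends in at least two free (non-C/J) characters and either the string has no fixed character while X>0 or Y>0, or the trailing free run has even length and the last fixed character's outgoing transition has positive cost (X>0 after 'C', Y>0 after 'J'), A's hand-made suffix corrections return a value that is not the cost of any assignment (e.g. solve(-4,1,'??')=-5 though the true minimum is -4), while B returns the true minimum cost, which is the intended value. — e.g. on solve(-4, 1, "??"): A returns -5, B returns -4
import Mathlib
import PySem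

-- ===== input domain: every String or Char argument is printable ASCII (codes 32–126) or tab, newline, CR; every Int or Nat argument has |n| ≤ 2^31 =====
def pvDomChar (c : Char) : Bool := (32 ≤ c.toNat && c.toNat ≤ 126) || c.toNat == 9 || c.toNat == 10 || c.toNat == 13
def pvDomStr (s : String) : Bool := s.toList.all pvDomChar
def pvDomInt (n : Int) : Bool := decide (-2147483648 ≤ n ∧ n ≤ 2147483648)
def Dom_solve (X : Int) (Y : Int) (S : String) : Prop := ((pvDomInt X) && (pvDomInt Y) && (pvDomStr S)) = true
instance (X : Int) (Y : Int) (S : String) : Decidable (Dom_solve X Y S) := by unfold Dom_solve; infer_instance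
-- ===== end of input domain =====

-- B replaces A's case-heavy greedy closed form by the standard two-state DP (objective: simpler);
-- on the D_solve corner A's suffix corrections are wrong and B returns the intended minimum.

-- ===== PORT A =====

-- cost[i] for the Python list cost = [X, Y]
def solveCost (X Y : Int) (i : Int) : Int := if i = 0 then X else Y

-- loop body of A; state = (prev, res, z)
def solveStep (X Y : Int) (st : Option Int × Int × Int) (ch : Char) : Option Int × Int × Int :=
  let (prev, res, z) := st
  if ch = 'C' ∨ ch = 'J' then
    let cur : Int := if ch = 'C' then 0 else 1
    let res :=
      if X + Y ≥ 0 then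
        match prev with
        | none => if solveCost X Y (1 - cur) < 0 ∧ 0 < z then res + solveCost X Y (1 - cur) else res
        | some p => if p ≠ cur then res + solveCost X Y p else res
      else
        match prev with
        | some p =>
            res + solveCost X Y p * PySem.Int.floordiv (z + (if p ≠ cur then 1 else 0) + 1) 2
                + solveCost X Y (1 - p) * PySem.Int.floordiv (z + (if p = cur then 1 else 0)) 2
        | none =>
            let r := res + solveCost X Y cur * PySem.Int.floordiv z 2
                         + solveCost X Y (1 - cur) * PySem.Int.floordiv (1 + z) 2
            if solveCost X Y cur > 0 ∧ 0 < z ∧ PySem.Int.mod z 2 = 0 then r - solveCost X Y cur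
            else if solveCost X Y (1 - cur) > 0 ∧ PySem.Int.mod z 2 = 1 then r - solveCost X Y (1 - cur)
            else r
    (some cur, res, 0)
  else (prev, res, z + 1)

def solve (X : Int) (Y : Int) (S : String) : Int :=
  let st := S.toList.foldl (solveStep X Y) (none, 0, 0)
  let prev := st.1
  let res := st.2.1
  let z := st.2.2
  if 0 < z then
    match prev with
    | none =>
        if X + Y ≥ 0 then
          if X < 0 ∧ 1 < z then X
          else if Y < 0 ∧ 1 < z then Y
          else 0
        else
          -- X, Y = min(X,Y), max(X,Y)
          let X' := min X Y
          let Y' := max X Y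
          let r := X' * PySem.Int.floordiv z 2 + Y' * PySem.Int.floordiv (z - 1) 2
          if Y' > 0 ∧ PySem.Int.mod z 2 = 0 then r - Y' else r
    | some p =>
        if X + Y ≥ 0 then
          if solveCost X Y p < 0 then res + solveCost X Y p else res
        else
          let r := res + solveCost X Y p * PySem.Int.floordiv (z + 1) 2
                       + solveCost X Y (1 - p) * PySem.Int.floordiv z 2
          if solveCost X Y p > 0 then r - solveCost X Y p
          else if solveCost X Y (1 - p) > 0 ∧ PySem.Int.mod z 2 = 0 then r - solveCost X Y (1 - p)
          else r
  else res

-- ===== PORT B =====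

-- None = infeasible state
def altAdd (a : Option Int) (b : Int) : Option Int :=
  match a with
  | none => none
  | some x => some (x + b)

def altMin (a b : Option Int) : Option Int :=
  match a, b with
  | none, b => b
  | a, none => a
  | some x, some y => some (min x y)

-- loop body of B; state = (first, c, j)
def altStep (X Y : Int) (st : Bool × Option Int × Option Int) (ch : Char) : Bool × Option Int × Option Int :=
  let (first, c, j) := st
  if first then
    (false, if ch = 'J' then none else some 0, if ch = 'C' then none else some 0)
  else
    let nc := altMin c (altAdd j Y)
    let nj := altMin j (altAdd c X)
    if ch = 'C' then (false, nc, none)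
    else if ch = 'J' then (false, none, nj)
    else (false, nc, nj)

def solve_alt (X : Int) (Y : Int) (S : String) : Int :=
  let st := S.toList.foldl (altStep X Y) (true, none, none)
  if st.1 then 0
  else
    match altMin st.2.1 st.2.2 with
    | some v => v
    | none => 0  -- unreachable: after the first character at least one state is feasible

-- ===== PRECONDITION & SPEC =====

-- When X+Y<0 and S ends in ≥2 free (non-'C'/'J') characters and either S has no fixed character while
-- X>0 or Y>0, or that trailing free run has even length and the last fixed character's outgoing
-- transition cost is positive (X>0 after 'C', Y>0 after 'J'), A's suffix corrections return a value
-- that is not the cost of any assignment (e.g. solve (-4) 1 "??" = -5, minimum is -4); B returns the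
-- true minimum cost, which is the intended value.
def D_solve (X : Int) (Y : Int) (S : String) : Prop :=
  let r := S.toList.reverse
  let z := (r.takeWhile (fun c => c != 'C' && c != 'J')).length
  X + Y < 0 ∧ 2 ≤ z ∧
    if r[z]? = none then 0 < max X Y
    else z % 2 = 0 ∧ 0 < (if r[z]? = some 'C' then X else Y)
instance (X : Int) (Y : Int) (S : String) : Decidable (D_solve X Y S) := by unfold D_solve; infer_instance

def Spec_solve (X : Int) (Y : Int) (S : String) (out : Int) : Prop := ¬ D_solve X Y S → out = solve_alt X Y S
instance (X : Int) (Y : Int) (S : String) (out : Int) : Decidable (Spec_solve X Y S out) := by unfold Spec_solve; infer_instance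

def pvDiffWitness_solve : Int × Int × String := (-4, 1, "??")
def pvDiffWitnessOut_solve : Int × Int := (-5, -4)

-- ===== CLAIM (what is proved, stated in full; the proofs are below) =====
def Claim_unchanged_solve : Prop := ∀ (X : Int) (Y : Int) (S : String), Dom_solve X Y S → Spec_solve X Y S (solve X Y S)
def Claim_exact_solve : Prop := ∀ (X : Int) (Y : Int) (S : String), Dom_solve X Y S → D_solve X Y S → solve X Y S ≠ solve_alt X Y S
def Claim_changed_solve : Prop := Dom_solve (pvDiffWitness_solve.1) (pvDiffWitness_solve.2.1) (pvDiffWitness_solve.2.2) ∧ D_solve (pvDiffWitness_solve.1) (pvDiffWitness_solve.2.1) (pvDiffWitness_solve.2.2) ∧ solve (pvDiffWitness_solve.1) (pvDiffWitness_solve.2.1) (pvDiffWitness_solve.2.2) = pvDiffWitnessOut_solve.1 ∧ solve_alt (pvDiffWitness_solve.1) (pvDiffWitness_solve.2.1) (pvDiffWitness_solve.2.2) = pvDiffWitnessOut_solve.2 ∧ pvDiffWitnessOut_solve.1 ≠ pvDiffWitnessOut_solve.2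

-- ===== LEMMAS AND PROOFS =====

-- cost of k switches along a run of free positions that ends in state "a-side",
-- where a switch INTO the end state costs b and a switch the other way costs a
def fsw (a b k : Int) : Int := if k ≤ 0 then 0 else (k + 1) / 2 * b + k / 2 * a

-- the invariant tying A's loop state (prev, res, z) to B's DP state (first, c, j)
def solveInv (X Y : Int) : Option Int × Int × Int → Bool × Option Int × Option Int → Prop
  | (prev, res, z), (first, c, j) =>
    0 ≤ z ∧
    match prev with
    | none =>
        res = 0 ∧
        (if z = 0 then first = true ∧ c = none ∧ j = none
         else first = false ∧
           (if 0 ≤ X + Y then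
              c = some (if Y < 0 ∧ 2 ≤ z then Y else 0) ∧
              j = some (if X < 0 ∧ 2 ≤ z then X else 0)
            else
              c = some (min (fsw X Y (z - 1)) (fsw X Y (z - 2))) ∧
              j = some (min (fsw Y X (z - 1)) (fsw Y X (z - 2)))))
    | some p =>
        first = false ∧ (p = 0 ∨ p = 1) ∧
        (let cp := if p = 0 then X else Y
         let sp := if p = 0 then c else j
         let so := if p = 0 then j else c
         if 0 ≤ X + Y then
           sp = some res ∧ so = (if z = 0 then none else some (res + cp))
         else
           sp = some (res + z / 2 * (X + Y)) ∧
           so = (if z = 0 then none else some (res + (z - 1) / 2 * (X + Y) + cp)))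

-- evaluation lemmas for fsw
lemma fsw_nonpos (a b k : Int) (hk : k ≤ 0) : fsw a b k = 0 := by simp [fsw, hk]

lemma fsw_even (a b m : Int) (hm : 0 ≤ m) : fsw a b (2 * m) = m * b + m * a := by
  rcases eq_or_lt_of_le hm with h | h
  · simp [fsw, ← h]
  · have hg : ¬ (2 * m ≤ 0) := by omega
    have h1 : (2 * m + 1) / 2 = m := by omega
    have h2 : (2 * m) / 2 = m := by omega
    simp only [fsw, if_neg hg, h1, h2]

lemma fsw_odd (a b m : Int) (hm : 0 ≤ m) : fsw a b (2 * m + 1) = (m + 1) * b + m * a := by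
  have hg : ¬ (2 * m + 1 ≤ 0) := by omega
  have h1 : (2 * m + 1 + 1) / 2 = m + 1 := by omega
  have h2 : (2 * m + 1) / 2 = m := by omega
  simp only [fsw, if_neg hg, h1, h2]

-- B enters a fixed state after z free characters, no fixed character before them (0 ≤ X + Y)
lemma leaf0 (a b z : Int) (hq : 0 ≤ a + b) (hz : 1 ≤ z) :
    min (if b < 0 ∧ 2 ≤ z then b else 0) ((if a < 0 ∧ 2 ≤ z then a else 0) + b)
      = if b < 0 ∧ 0 < z then b else 0 := by
  split_ifs <;> omega

-- one more free character, no fixed character yet (0 ≤ X + Y)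
lemma leaf0' (a b z : Int) (hq : 0 ≤ a + b) (hz : 1 ≤ z) :
    min (if b < 0 ∧ 2 ≤ z then b else 0) ((if a < 0 ∧ 2 ≤ z then a else 0) + b)
      = if b < 0 ∧ 2 ≤ z + 1 then b else 0 := by
  split_ifs <;> omega

-- the DP step through the (z+1)-st free char, no fixed char yet (a + b < 0)
lemma leafJoin (a b z : Int) (hq : a + b < 0) (hz : 1 ≤ z) :
    min (min (fsw a b (z - 1)) (fsw a b (z - 2))) (min (fsw b a (z - 1)) (fsw b a (z - 2)) + b)
      = min (fsw a b z) (fsw a b (z - 1)) := by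
  obtain ⟨m, hm⟩ : ∃ m, z = 2 * m ∨ z = 2 * m + 1 := ⟨z / 2, by omega⟩
  rcases hm with hm | hm <;> subst hm
  · have hm1 : 1 ≤ m := by omega
    have E1 : fsw a b (2 * m - 1) = (m - 1 + 1) * b + (m - 1) * a := by
      rw [show 2 * m - 1 = 2 * (m - 1) + 1 by ring]; exact fsw_odd _ _ _ (by omega)
    have E2 : fsw a b (2 * m - 2) = (m - 1) * b + (m - 1) * a := by
      rw [show 2 * m - 2 = 2 * (m - 1) by ring]; exact fsw_even _ _ _ (by omega)
    have E3 : fsw b a (2 * m - 1) = (m - 1 + 1) * a + (m - 1) * b := by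
      rw [show 2 * m - 1 = 2 * (m - 1) + 1 by ring]; exact fsw_odd _ _ _ (by omega)
    have E4 : fsw b a (2 * m - 2) = (m - 1) * a + (m - 1) * b := by
      rw [show 2 * m - 2 = 2 * (m - 1) by ring]; exact fsw_even _ _ _ (by omega)
    have E5 : fsw a b (2 * m) = m * b + m * a := fsw_even _ _ _ (by omega)
    rw [E1, E2, E3, E4, E5]
    simp only [min_def]; split_ifs <;> first | exact (‹False›).elim | linarith
  · rcases eq_or_lt_of_le (show 0 ≤ m by omega) with h0 | h0
    · subst h0
      have E1 : fsw a b (2 * 0 + 1 - 1) = 0 := fsw_nonpos _ _ _ (by omega)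
      have E2 : fsw a b (2 * 0 + 1 - 2) = 0 := fsw_nonpos _ _ _ (by omega)
      have E3 : fsw b a (2 * 0 + 1 - 1) = 0 := fsw_nonpos _ _ _ (by omega)
      have E4 : fsw b a (2 * 0 + 1 - 2) = 0 := fsw_nonpos _ _ _ (by omega)
      have E5 : fsw a b (2 * 0 + 1) = (0 + 1) * b + 0 * a := fsw_odd _ _ _ (by omega)
      rw [E1, E2, E3, E4, E5]
      simp only [min_def]; split_ifs <;> first | exact (‹False›).elim | linarith
    · have E1 : fsw a b (2 * m + 1 - 1) = m * b + m * a := by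
        rw [show 2 * m + 1 - 1 = 2 * m by ring]; exact fsw_even _ _ _ (by omega)
      have E2 : fsw a b (2 * m + 1 - 2) = (m - 1 + 1) * b + (m - 1) * a := by
        rw [show 2 * m + 1 - 2 = 2 * (m - 1) + 1 by ring]; exact fsw_odd _ _ _ (by omega)
      have E3 : fsw b a (2 * m + 1 - 1) = m * a + m * b := by
        rw [show 2 * m + 1 - 1 = 2 * m by ring]; exact fsw_even _ _ _ (by omega)
      have E4 : fsw b a (2 * m + 1 - 2) = (m - 1 + 1) * a + (m - 1) * b := by
        rw [show 2 * m + 1 - 2 = 2 * (m - 1) + 1 by ring]; exact fsw_odd _ _ _ (by omega)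
      have E5 : fsw a b (2 * m + 1) = (m + 1) * b + m * a := fsw_odd _ _ _ (by omega)
      rw [E1, E2, E3, E4, E5]
      simp only [min_def]; split_ifs <;> first | exact (‹False›).elim | linarith

-- A's prefix-group formula equals the DP value entering a fixed state (a + b < 0)
lemma leafA (a b z : Int) (hq : a + b < 0) (hz : 1 ≤ z) :
    min (fsw a b z) (fsw a b (z - 1))
      = (if 0 < a ∧ 0 < z ∧ z % 2 = 0 then a * (z / 2) + b * ((1 + z) / 2) - a
         else if 0 < b ∧ z % 2 = 1 then a * (z / 2) + b * ((1 + z) / 2) - b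
         else a * (z / 2) + b * ((1 + z) / 2)) := by
  obtain ⟨m, hm⟩ : ∃ m, z = 2 * m ∨ z = 2 * m + 1 := ⟨z / 2, by omega⟩
  rcases hm with hm | hm <;> subst hm
  · have hm1 : 1 ≤ m := by omega
    have E1 : fsw a b (2 * m) = m * b + m * a := fsw_even _ _ _ (by omega)
    have E2 : fsw a b (2 * m - 1) = (m - 1 + 1) * b + (m - 1) * a := by
      rw [show 2 * m - 1 = 2 * (m - 1) + 1 by ring]; exact fsw_odd _ _ _ (by omega)
    rw [E1, E2, show (2 * m) / 2 = m by omega, show (1 + 2 * m) / 2 = m by omega,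
        ]
    simp only [show (0 < a ∧ 0 < 2 * m ∧ (2 * m) % 2 = 0) ↔ 0 < a by omega,
        show ¬ (0 < b ∧ (2 * m) % 2 = 1) by omega, min_def]
    split_ifs <;> first | exact (‹False›).elim | linarith
  · have E1 : fsw a b (2 * m + 1) = (m + 1) * b + m * a := fsw_odd _ _ _ (by omega)
    have E2 : fsw a b (2 * m + 1 - 1) = m * b + m * a := by
      rw [show 2 * m + 1 - 1 = 2 * m by ring]; exact fsw_even _ _ _ (by omega)
    rw [E1, E2, show (2 * m + 1) / 2 = m by omega, show (1 + (2 * m + 1)) / 2 = m + 1 by omega,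
        ]
    simp only [show ¬ (0 < a ∧ 0 < 2 * m + 1 ∧ (2 * m + 1) % 2 = 0) by omega,
        show (0 < b ∧ (2 * m + 1) % 2 = 1) ↔ 0 < b by omega, min_def]
    split_ifs <;> first | exact (‹False›).elim | linarith

-- DP step staying in / entering the state of the last fixed char (a + b < 0)
lemma leafP1 (q z res : Int) (hq : q < 0) (hz : 1 ≤ z) :
    min (res + z / 2 * q) (res + (z - 1) / 2 * q + q) = res + (z + 1) / 2 * q := by
  have e : res + (z - 1) / 2 * q + q = res + (z + 1) / 2 * q := by
    rw [show (z + 1) / 2 = (z - 1) / 2 + 1 by omega]; ring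
  rw [e]
  refine min_eq_right ?_
  have := mul_le_mul_of_nonpos_right (show z / 2 ≤ (z + 1) / 2 by omega) (le_of_lt hq)
  linarith

-- suffix, whole string free, both costs nonpositive (a + b < 0 after min/max split)
lemma leafS1 (a b z : Int) (ha : a ≤ 0) (hb : b ≤ 0) (hab : a ≤ b) (hz : 2 ≤ z) :
    min (min (fsw a b (z - 1)) (fsw a b (z - 2))) (min (fsw b a (z - 1)) (fsw b a (z - 2)))
      = a * (z / 2) + b * ((z - 1) / 2) := by
  obtain ⟨m, hm⟩ : ∃ m, z = 2 * m ∨ z = 2 * m + 1 := ⟨z / 2, by omega⟩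
  rcases hm with hm | hm <;> subst hm
  · have hm1 : 1 ≤ m := by omega
    have E1 : fsw a b (2 * m - 1) = (m - 1 + 1) * b + (m - 1) * a := by
      rw [show 2 * m - 1 = 2 * (m - 1) + 1 by ring]; exact fsw_odd _ _ _ (by omega)
    have E2 : fsw a b (2 * m - 2) = (m - 1) * b + (m - 1) * a := by
      rw [show 2 * m - 2 = 2 * (m - 1) by ring]; exact fsw_even _ _ _ (by omega)
    have E3 : fsw b a (2 * m - 1) = (m - 1 + 1) * a + (m - 1) * b := by
      rw [show 2 * m - 1 = 2 * (m - 1) + 1 by ring]; exact fsw_odd _ _ _ (by omega)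
    have E4 : fsw b a (2 * m - 2) = (m - 1) * a + (m - 1) * b := by
      rw [show 2 * m - 2 = 2 * (m - 1) by ring]; exact fsw_even _ _ _ (by omega)
    rw [show (2 * m) / 2 = m by omega, show (2 * m - 1) / 2 = m - 1 by omega, E1, E2, E3, E4]
    simp only [min_def]; split_ifs <;> first | exact (‹False›).elim | linarith
  · have hm1 : 1 ≤ m := by omega
    have E1 : fsw a b (2 * m + 1 - 1) = m * b + m * a := by
      rw [show 2 * m + 1 - 1 = 2 * m by ring]; exact fsw_even _ _ _ (by omega)
    have E2 : fsw a b (2 * m + 1 - 2) = (m - 1 + 1) * b + (m - 1) * a := by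
      rw [show 2 * m + 1 - 2 = 2 * (m - 1) + 1 by ring]; exact fsw_odd _ _ _ (by omega)
    have E3 : fsw b a (2 * m + 1 - 1) = m * a + m * b := by
      rw [show 2 * m + 1 - 1 = 2 * m by ring]; exact fsw_even _ _ _ (by omega)
    have E4 : fsw b a (2 * m + 1 - 2) = (m - 1 + 1) * a + (m - 1) * b := by
      rw [show 2 * m + 1 - 2 = 2 * (m - 1) + 1 by ring]; exact fsw_odd _ _ _ (by omega)
    rw [show (2 * m + 1) / 2 = m by omega, show (2 * m + 1 - 1) / 2 = m by omega, E1, E2, E3, E4]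
    simp only [min_def]; split_ifs <;> first | exact (‹False›).elim | linarith

-- suffix after a fixed char, a = cost of leaving it, b = cost back (a + b < 0, not the D region)
lemma leafS2 (a b z res : Int) (hq : a + b < 0) (hz : 1 ≤ z) (hD : ¬ (z % 2 = 0 ∧ 0 < a)) :
    min (res + z / 2 * (a + b)) (res + (z - 1) / 2 * (a + b) + a)
      = (if 0 < a then res + a * ((z + 1) / 2) + b * (z / 2) - a
         else if 0 < b ∧ z % 2 = 0 then res + a * ((z + 1) / 2) + b * (z / 2) - b
         else res + a * ((z + 1) / 2) + b * (z / 2)) := by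
  obtain ⟨m, hm⟩ : ∃ m, z = 2 * m ∨ z = 2 * m + 1 := ⟨z / 2, by omega⟩
  rcases hm with hm | hm <;> subst hm
  · have hm1 : 1 ≤ m := by omega
    rw [show (2 * m) / 2 = m by omega, show (2 * m - 1) / 2 = m - 1 by omega,
        show (2 * m + 1) / 2 = m by omega]
    have ha : ¬ 0 < a := by intro h; exact hD ⟨by omega, h⟩
    simp only [ha, show (0 < b ∧ (2 * m) % 2 = 0) ↔ 0 < b by omega, min_def, if_false]
    split_ifs <;> first | exact (‹False›).elim | linarith
  · rw [show (2 * m + 1) / 2 = m by omega, show (2 * m + 1 - 1) / 2 = m by omega,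
        show (2 * m + 1 + 1) / 2 = m + 1 by omega]
    simp only [show ¬ (0 < b ∧ (2 * m + 1) % 2 = 0) by omega, min_def]
    split_ifs <;> first | exact (‹False›).elim | linarith

lemma inv_step (X Y : Int) (a : Option Int × Int × Int) (b : Bool × Option Int × Option Int)
    (ch : Char) (h : solveInv X Y a b) : solveInv X Y (solveStep X Y a ch) (altStep X Y b ch) := by
  obtain ⟨prev, res, z⟩ := a
  obtain ⟨first, c, j⟩ := b
  have fd2 : ∀ t : Int, PySem.Int.floordiv t 2 = t / 2 :=
    fun t => PySem.Int.floordiv_eq_ediv_of_pos (by norm_num)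
  have md2 : ∀ t : Int, PySem.Int.mod t 2 = t % 2 :=
    fun t => PySem.Int.mod_eq_emod_of_pos (by norm_num)
  obtain ⟨hz, hm⟩ := h
  by_cases hch : ch = 'C' ∨ ch = 'J'
  · rcases prev with _ | p
    · -- prev = none
      obtain ⟨hres, hrest⟩ := hm
      subst hres
      by_cases hz0 : z = 0
      · subst hz0
        simp only [if_pos rfl] at hrest
        obtain ⟨hf, hc, hj⟩ := hrest
        subst hf; subst hc; subst hj
        rcases hch with hE | hE <;> subst hE <;>
          by_cases hq : 0 ≤ X + Y <;>
            simp [solveStep, altStep, solveInv, solveCost, altMin, altAdd, fd2, md2, hq]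
      · simp only [if_neg hz0] at hrest
        obtain ⟨hf, hrest⟩ := hrest
        subst hf
        have hz1 : 1 ≤ z := by omega
        by_cases hq : 0 ≤ X + Y
        · rw [if_pos hq] at hrest
          obtain ⟨hc, hj⟩ := hrest
          subst hc; subst hj
          rcases hch with hE | hE <;> subst hE <;>
            simp [solveStep, altStep, solveInv, solveCost, altMin, altAdd, fd2, md2, hq, hz0]
          · exact leaf0 X Y z hq hz1
          · exact leaf0 Y X z (by omega) hz1
        · rw [if_neg hq] at hrest
          obtain ⟨hc, hj⟩ := hrest
          subst hc; subst hj
          rcases hch with hE | hE <;> subst hE <;>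
            simp [solveStep, altStep, solveInv, solveCost, altMin, altAdd, fd2, md2, hq, hz0]
          · have hJ := leafJoin X Y z (by omega) hz1
            rw [min_assoc] at hJ
            rw [hJ, leafA X Y z (by omega) hz1]
            simp only [Int.dvd_iff_emod_eq_zero]
          · have hJ := leafJoin Y X z (by omega) hz1
            rw [min_assoc] at hJ
            rw [hJ, leafA Y X z (by omega) hz1]
            simp only [Int.dvd_iff_emod_eq_zero]
    · -- prev = some p
      obtain ⟨hf, hp, hrest⟩ := hm
      subst hf
      rcases hp with hp | hp <;> subst hp <;>
        by_cases hq : 0 ≤ X + Y <;>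
          [rw [if_pos hq] at hrest; rw [if_neg hq] at hrest;
           rw [if_pos hq] at hrest; rw [if_neg hq] at hrest] <;>
        obtain ⟨hsp, hso⟩ := hrest <;>
        by_cases hz0 : z = 0 <;>
        [skip; skip; skip; skip; skip; skip; skip; skip] <;>
        first
        | (subst hz0; rw [if_pos rfl] at hso; subst hsp; subst hso;
           rcases hch with hE | hE <;> subst hE <;>
             simp [solveStep, altStep, solveInv, solveCost, altMin, altAdd, fd2, md2, hq])
        | (rw [if_neg hz0] at hso; subst hsp; subst hso;
           rcases hch with hE | hE <;> subst hE <;>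
             simp [solveStep, altStep, solveInv, solveCost, altMin, altAdd, fd2, md2, hq, hz0])
      · omega
      · rw [show res + (z - 1) / 2 * (X + Y) + X + Y = res + (z - 1) / 2 * (X + Y) + (X + Y) by ring,
            leafP1 (X + Y) z res (by omega) (by omega)]
        ring
      · have hle := mul_le_mul_of_nonpos_right (show (z - 1) / 2 ≤ z / 2 by omega)
          (show X + Y ≤ 0 by omega)
        rw [min_eq_right hle, show (z + 1 + 1) / 2 = z / 2 + 1 by omega]
        ring
      · omega
      · have hle := mul_le_mul_of_nonpos_right (show (z - 1) / 2 ≤ z / 2 by omega)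
          (show X + Y ≤ 0 by omega)
        rw [min_eq_right hle, show (z + 1 + 1) / 2 = z / 2 + 1 by omega]
        ring
      · rw [show res + (z - 1) / 2 * (X + Y) + Y + X = res + (z - 1) / 2 * (X + Y) + (X + Y) by ring,
            leafP1 (X + Y) z res (by omega) (by omega)]
        ring
  · -- free char
    have hA : solveStep X Y (prev, res, z) ch = (prev, res, z + 1) := by
      simp [solveStep, hch]
    rw [hA]
    rcases prev with _ | p
    · obtain ⟨hres, hrest⟩ := hm
      subst hres
      by_cases hz0 : z = 0
      · subst hz0
        simp only [if_pos rfl] at hrest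
        obtain ⟨hf, hc, hj⟩ := hrest
        subst hf; subst hc; subst hj
        have hc1 : ch ≠ 'C' := fun hh => hch (Or.inl hh)
        have hc2 : ch ≠ 'J' := fun hh => hch (Or.inr hh)
        by_cases hq : 0 ≤ X + Y <;>
          simp [altStep, solveInv, altMin, altAdd, hc1, hc2, hq, fsw_nonpos]
      · simp only [if_neg hz0] at hrest
        obtain ⟨hf, hrest⟩ := hrest
        subst hf
        have hz1 : 1 ≤ z := by omega
        have hc1 : ch ≠ 'C' := fun hh => hch (Or.inl hh)
        have hc2 : ch ≠ 'J' := fun hh => hch (Or.inr hh)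
        by_cases hq : 0 ≤ X + Y
        · rw [if_pos hq] at hrest
          obtain ⟨hc, hj⟩ := hrest
          subst hc; subst hj
          simp [altStep, solveInv, altMin, altAdd, hc1, hc2, hq, hz0]
          refine ⟨by omega, ?_⟩
          refine ⟨by omega, ?_, ?_⟩
          · exact leaf0' X Y z hq hz1
          · exact leaf0' Y X z (by omega) hz1
        · rw [if_neg hq] at hrest
          obtain ⟨hc, hj⟩ := hrest
          subst hc; subst hj
          simp [altStep, solveInv, altMin, altAdd, hc1, hc2, hq, hz0,
                show z + 1 - 2 = z - 1 by ring]
          refine ⟨by omega, ?_⟩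
          refine ⟨by omega, ?_, ?_⟩
          · have hJ := leafJoin X Y z (by omega) hz1; rw [min_assoc] at hJ; exact hJ
          · have hJ := leafJoin Y X z (by omega) hz1; rw [min_assoc] at hJ; exact hJ
    · obtain ⟨hf, hp, hrest⟩ := hm
      subst hf
      have hc1 : ch ≠ 'C' := fun hh => hch (Or.inl hh)
      have hc2 : ch ≠ 'J' := fun hh => hch (Or.inr hh)
      rcases hp with hp | hp <;> subst hp <;>
        by_cases hq : 0 ≤ X + Y <;>
          [rw [if_pos hq] at hrest; rw [if_neg hq] at hrest;
           rw [if_pos hq] at hrest; rw [if_neg hq] at hrest] <;>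
        obtain ⟨hsp, hso⟩ := hrest <;>
        by_cases hz0 : z = 0 <;>
        first
        | (subst hz0; rw [if_pos rfl] at hso; subst hsp; subst hso;
           simp [altStep, solveInv, altMin, altAdd, hc1, hc2, hq])
        | (rw [if_neg hz0] at hso; subst hsp; subst hso;
           simp [altStep, solveInv, altMin, altAdd, hc1, hc2, hq, hz0])
      · omega
      · refine ⟨by omega, ?_, by omega,
          mul_le_mul_of_nonpos_right (show (z - 1) / 2 ≤ z / 2 by omega) (by omega)⟩
        rw [show res + (z - 1) / 2 * (X + Y) + X + Y = res + (z - 1) / 2 * (X + Y) + (X + Y) by ring]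
        exact leafP1 (X + Y) z res (by omega) (by omega)
      · omega
      · refine ⟨by omega, ?_, by omega,
          mul_le_mul_of_nonpos_right (show (z - 1) / 2 ≤ z / 2 by omega) (by omega)⟩
        rw [show res + (z - 1) / 2 * (X + Y) + Y + X = res + (z - 1) / 2 * (X + Y) + (X + Y) by ring]
        exact leafP1 (X + Y) z res (by omega) (by omega)


lemma inv_foldl (X Y : Int) (l : List Char) (a : Option Int × Int × Int)
    (b : Bool × Option Int × Option Int) (h : solveInv X Y a b) :
    solveInv X Y (l.foldl (solveStep X Y) a) (l.foldl (altStep X Y) b) := by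
  induction l generalizing a b with
  | nil => exact h
  | cons ch l ih => exact ih _ _ (inv_step X Y a b ch h)

def freeCh (c : Char) : Bool := c != 'C' && c != 'J'

lemma shape (X Y : Int) (l : List Char) :
    (l.foldl (solveStep X Y) (none, 0, 0)).2.2
      = ((l.reverse.takeWhile freeCh).length : Int) ∧
    (l.foldl (solveStep X Y) (none, 0, 0)).1
      = (l.reverse[(l.reverse.takeWhile freeCh).length]?).map
          (fun c => if c = 'C' then (0 : Int) else 1) := by
  induction l using List.reverseRecOn with
  | nil => simp
  | append_singleton l ch ih =>
    rcases ih with ⟨ih1, ih2⟩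
    by_cases hc : ch = 'C' ∨ ch = 'J'
    · have hfree : freeCh ch = false := by
        rcases hc with h | h <;> simp [freeCh, h]
      simp [List.foldl_append, List.reverse_append, solveStep, hc, hfree]
    · have hfree : freeCh ch = true := by
        simp [freeCh]
        push_neg at hc
        exact ⟨by simpa using hc.1, by simpa using hc.2⟩
      constructor
      · simp [List.foldl_append, List.reverse_append, solveStep, hc, hfree]
        omega
      · simpa [List.foldl_append, List.reverse_append, solveStep, hc, hfree] using ih2

-- inside D, whole string free: A's all-free formula misses the optimum by max X Y or loses a switch
lemma leafT1 (a b z : Int) (hab : a ≤ b) (hq : a + b < 0) (hb : 0 < b) (hz : 2 ≤ z) :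
    (if b > 0 ∧ z % 2 = 0 then a * (z / 2) + b * ((z - 1) / 2) - b
     else a * (z / 2) + b * ((z - 1) / 2))
      ≠ min (min (fsw a b (z - 1)) (fsw a b (z - 2))) (min (fsw b a (z - 1)) (fsw b a (z - 2))) := by
  obtain ⟨m, hm⟩ : ∃ m, z = 2 * m ∨ z = 2 * m + 1 := ⟨z / 2, by omega⟩
  rcases hm with hm | hm <;> subst hm
  · have hm1 : 1 ≤ m := by omega
    have E1 : fsw a b (2 * m - 1) = (m - 1 + 1) * b + (m - 1) * a := by
      rw [show 2 * m - 1 = 2 * (m - 1) + 1 by ring]; exact fsw_odd _ _ _ (by omega)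
    have E2 : fsw a b (2 * m - 2) = (m - 1) * b + (m - 1) * a := by
      rw [show 2 * m - 2 = 2 * (m - 1) by ring]; exact fsw_even _ _ _ (by omega)
    have E3 : fsw b a (2 * m - 1) = (m - 1 + 1) * a + (m - 1) * b := by
      rw [show 2 * m - 1 = 2 * (m - 1) + 1 by ring]; exact fsw_odd _ _ _ (by omega)
    have E4 : fsw b a (2 * m - 2) = (m - 1) * a + (m - 1) * b := by
      rw [show 2 * m - 2 = 2 * (m - 1) by ring]; exact fsw_even _ _ _ (by omega)
    rw [E1, E2, E3, E4, show (2 * m) / 2 = m by omega, show (2 * m - 1) / 2 = m - 1 by omega,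
        if_pos (show b > 0 ∧ (2 * m) % 2 = 0 from ⟨hb, by omega⟩)]
    simp only [min_def]
    split_ifs <;> intro h <;> linarith
  · have hm1 : 1 ≤ m := by omega
    have E1 : fsw a b (2 * m + 1 - 1) = m * b + m * a := by
      rw [show 2 * m + 1 - 1 = 2 * m by ring]; exact fsw_even _ _ _ (by omega)
    have E2 : fsw a b (2 * m + 1 - 2) = (m - 1 + 1) * b + (m - 1) * a := by
      rw [show 2 * m + 1 - 2 = 2 * (m - 1) + 1 by ring]; exact fsw_odd _ _ _ (by omega)
    have E3 : fsw b a (2 * m + 1 - 1) = m * a + m * b := by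
      rw [show 2 * m + 1 - 1 = 2 * m by ring]; exact fsw_even _ _ _ (by omega)
    have E4 : fsw b a (2 * m + 1 - 2) = (m - 1 + 1) * a + (m - 1) * b := by
      rw [show 2 * m + 1 - 2 = 2 * (m - 1) + 1 by ring]; exact fsw_odd _ _ _ (by omega)
    rw [E1, E2, E3, E4, show (2 * m + 1) / 2 = m by omega,
        show (2 * m + 1 - 1) / 2 = m by omega]
    simp only [show ¬ (b > 0 ∧ (2 * m + 1) % 2 = 0) by omega, if_false, min_def]
    split_ifs <;> intro h <;> linarith

-- inside D, after a fixed char with positive leaving cost and an even free tail: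
-- A subtracts that cost once too often
lemma leafT2 (a b z res : Int) (hq : a + b < 0) (hz : 2 ≤ z) (he : z % 2 = 0) (ha : 0 < a) :
    res + a * ((z + 1) / 2) + b * (z / 2) - a
      ≠ min (res + z / 2 * (a + b)) (res + (z - 1) / 2 * (a + b) + a) := by
  obtain ⟨m, hm⟩ : ∃ m, z = 2 * m := ⟨z / 2, by omega⟩
  subst hm
  rw [show (2 * m + 1) / 2 = m by omega, show (2 * m) / 2 = m by omega,
      show (2 * m - 1) / 2 = m - 1 by omega]
  simp only [min_def]
  split_ifs <;> intro h <;> nlinarith [mul_le_mul_of_nonpos_right (show m - 1 ≤ m by omega)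
    (show a + b ≤ 0 by omega)]

theorem solve_spec_aux : ∀ (X Y : Int) (S : String), ¬ D_solve X Y S → solve X Y S = solve_alt X Y S := by
  intro X Y S hD
  have hInv := inv_foldl X Y S.toList (none, 0, 0) (true, none, none) (by simp [solveInv])
  obtain ⟨hsh1, hsh2⟩ := shape X Y S.toList
  simp only [D_solve, show (fun c : Char => c != 'C' && c != 'J') = freeCh from rfl] at hD
  unfold solve solve_alt
  have fd2 : ∀ t : Int, PySem.Int.floordiv t 2 = t / 2 :=
    fun t => PySem.Int.floordiv_eq_ediv_of_pos (by norm_num)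
  have md2 : ∀ t : Int, PySem.Int.mod t 2 = t % 2 :=
    fun t => PySem.Int.mod_eq_emod_of_pos (by norm_num)
  generalize hga : List.foldl (solveStep X Y) (none, 0, 0) S.toList = st at hInv hsh1 hsh2 ⊢
  generalize hgb : List.foldl (altStep X Y) (true, none, none) S.toList = bt at hInv ⊢
  generalize hzN : (List.takeWhile freeCh S.toList.reverse).length = zN at hD hsh1 hsh2
  generalize hL : S.toList.reverse[zN]? = L at hD hsh2
  obtain ⟨prev, res, z⟩ := st
  obtain ⟨first, c, j⟩ := bt
  simp only [solveInv] at hInv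
  simp only at hsh1 hsh2 ⊢
  obtain ⟨hzge, hInv⟩ := hInv
  rcases prev with _ | p
  · -- no fixed character in S
    have hLnone : L = none := by
      cases L with
      | none => rfl
      | some c0 => simp at hsh2
    subst hLnone
    simp only [if_pos rfl] at hD
    obtain ⟨hres, hrest⟩ := hInv
    subst hres
    by_cases hz0 : z = 0
    · subst hz0
      simp only [if_pos rfl] at hrest
      obtain ⟨hf, hc, hj⟩ := hrest
      subst hf; subst hc; subst hj
      norm_num
    · simp only [if_neg hz0] at hrest
      obtain ⟨hf, hrest⟩ := hrest
      subst hf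
      have hz1 : 1 ≤ z := by omega
      by_cases hq : 0 ≤ X + Y
      · rw [if_pos hq] at hrest
        obtain ⟨hc, hj⟩ := hrest
        subst hc; subst hj
        simp [altMin, altAdd, fd2, md2, hq, hz1, show (0:Int) < z by omega]
        split_ifs <;> omega
      · rw [if_neg hq] at hrest
        obtain ⟨hc, hj⟩ := hrest
        subst hc; subst hj
        have hnd : ¬ (2 ≤ zN ∧ 0 < max X Y) := by
          intro ⟨h1, h2⟩; exact hD ⟨by omega, h1, h2⟩
        simp only [if_pos (show 0 < z by omega), fd2, md2, altMin, ge_iff_le, if_neg hq]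
        by_cases hz2 : z = 1
        · rw [hz2]
          rw [show (1 : Int) - 1 = 0 by ring, show (1 : Int) - 2 = -1 by ring,
              fsw_nonpos X Y 0 le_rfl, fsw_nonpos X Y (-1) (by omega),
              fsw_nonpos Y X 0 le_rfl, fsw_nonpos Y X (-1) (by omega)]
          norm_num
        · have hXY : X ≤ 0 ∧ Y ≤ 0 := by
            by_contra hc
            exact hnd ⟨by omega, by omega⟩
          have hz2' : 2 ≤ z := by omega
          rw [if_neg (by push Not; intro h; omega : ¬ (max X Y > 0 ∧ z % 2 = 0))]
          rcases le_total X Y with hxy | hxy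
          · rw [min_eq_left hxy, max_eq_right hxy, ← leafS1 X Y z hXY.1 hXY.2 hxy hz2']
            simp
          · rw [min_eq_right hxy, max_eq_left hxy, ← leafS1 Y X z hXY.2 hXY.1 hxy hz2',
                min_comm]
            simp
  · -- last fixed character
    obtain ⟨hf, hp, hrest⟩ := hInv
    subst hf
    have hcp : ∃ ch', L = some ch' := by
      cases L with
      | none => simp at hsh2
      | some ch' => exact ⟨ch', rfl⟩
    obtain ⟨ch', hL'⟩ := hcp
    subst hL'
    simp only [Option.map_some] at hsh2
    have hp2 : p = if ch' = 'C' then (0 : Int) else 1 := Option.some.inj hsh2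
    simp only [show (some ch' = (none : Option Char)) = False by simp, if_false,
               Option.some.injEq] at hD
    rcases hp with hp | hp <;> subst hp
    · -- p = 0, the last fixed character is 'C'
      have hc' : ch' = 'C' := by
        by_contra hcc
        rw [if_neg hcc] at hp2
        exact absurd hp2 (by norm_num)
      subst hc'
      rw [if_pos rfl] at hD
      by_cases hq : 0 ≤ X + Y
      · rw [if_pos hq] at hrest
        obtain ⟨hsp, hso⟩ := hrest
        subst hsp
        by_cases hz0 : z = 0
        · subst hz0
          rw [if_pos rfl] at hso
          subst hso
          simp [altMin]
        · rw [if_neg hz0] at hso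
          subst hso
          simp [altMin, fd2, md2, solveCost, show 0 < z by omega, show X + Y ≥ 0 from hq]
          split_ifs <;> omega
      · rw [if_neg hq] at hrest
        obtain ⟨hsp, hso⟩ := hrest
        subst hsp
        by_cases hz0 : z = 0
        · subst hz0
          rw [if_pos rfl] at hso
          subst hso
          simp [altMin]
        · rw [if_neg hz0] at hso
          subst hso
          have hDD : ¬ (z % 2 = 0 ∧ 0 < X) := by
            intro ⟨he, hx⟩
            rcases eq_or_lt_of_le (show 1 ≤ z by omega) with h1 | h1
            · omega
            · exact hD ⟨by omega, by omega, by omega, hx⟩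
          simp [altMin, fd2, md2, solveCost, show 0 < z by omega,
                show ¬ (X + Y ≥ 0) from hq]
          simp only [Int.dvd_iff_emod_eq_zero]
          rw [leafS2 X Y z res (by omega) (by omega) hDD]
    · -- p = 1, the last fixed character is not 'C'
      have hc' : ch' ≠ 'C' := by
        by_contra hcc
        rw [if_pos hcc] at hp2
        exact absurd hp2 (by norm_num)
      rw [if_neg hc'] at hD
      by_cases hq : 0 ≤ X + Y
      · rw [if_pos hq] at hrest
        obtain ⟨hsp, hso⟩ := hrest
        subst hsp
        by_cases hz0 : z = 0
        · subst hz0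
          rw [if_pos rfl] at hso
          subst hso
          simp [altMin]
        · rw [if_neg hz0] at hso
          subst hso
          simp [altMin, fd2, md2, solveCost, show 0 < z by omega, show X + Y ≥ 0 from hq]
          split_ifs <;> omega
      · rw [if_neg hq] at hrest
        obtain ⟨hsp, hso⟩ := hrest
        subst hsp
        by_cases hz0 : z = 0
        · subst hz0
          rw [if_pos rfl] at hso
          subst hso
          simp [altMin]
        · rw [if_neg hz0] at hso
          subst hso
          have hDD : ¬ (z % 2 = 0 ∧ 0 < Y) := by
            intro ⟨he, hy⟩
            rcases eq_or_lt_of_le (show 1 ≤ z by omega) with h1 | h1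
            · omega
            · exact hD ⟨by omega, by omega, by omega, hy⟩
          simp [altMin, fd2, md2, solveCost, show 0 < z by omega,
                show ¬ (X + Y ≥ 0) from hq]
          simp only [Int.dvd_iff_emod_eq_zero]
          rw [add_comm X Y, min_comm (res + (z - 1) / 2 * (Y + X) + Y),
              leafS2 Y X z res (by omega) (by omega) hDD]


theorem solve_tight_aux : ∀ (X Y : Int) (S : String), D_solve X Y S → solve X Y S ≠ solve_alt X Y S := by
  intro X Y S hD
  have hInv := inv_foldl X Y S.toList (none, 0, 0) (true, none, none) (by simp [solveInv])
  obtain ⟨hsh1, hsh2⟩ := shape X Y S.toList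
  simp only [D_solve, show (fun c : Char => c != 'C' && c != 'J') = freeCh from rfl] at hD
  unfold solve solve_alt
  have fd2 : ∀ t : Int, PySem.Int.floordiv t 2 = t / 2 :=
    fun t => PySem.Int.floordiv_eq_ediv_of_pos (by norm_num)
  have md2 : ∀ t : Int, PySem.Int.mod t 2 = t % 2 :=
    fun t => PySem.Int.mod_eq_emod_of_pos (by norm_num)
  generalize hga : List.foldl (solveStep X Y) (none, 0, 0) S.toList = st at hInv hsh1 hsh2 ⊢
  generalize hgb : List.foldl (altStep X Y) (true, none, none) S.toList = bt at hInv ⊢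
  generalize hzN : (List.takeWhile freeCh S.toList.reverse).length = zN at hD hsh1 hsh2
  generalize hL : S.toList.reverse[zN]? = L at hD hsh2
  obtain ⟨prev, res, z⟩ := st
  obtain ⟨first, c, j⟩ := bt
  simp only [solveInv] at hInv
  simp only at hsh1 hsh2 ⊢
  obtain ⟨hzge, hInv⟩ := hInv
  obtain ⟨hq, hz2, hD⟩ := hD
  have hq' : ¬ 0 ≤ X + Y := by omega
  have hz2' : 2 ≤ z := by omega
  rcases prev with _ | p
  · -- whole string free
    have hLnone : L = none := by
      cases L with
      | none => rfl
      | some c0 => simp at hsh2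
    subst hLnone
    simp only [if_pos rfl] at hD
    obtain ⟨hres, hrest⟩ := hInv
    subst hres
    rw [if_neg (by omega : ¬ z = 0)] at hrest
    obtain ⟨hf, hrest⟩ := hrest
    subst hf
    rw [if_neg hq'] at hrest
    obtain ⟨hc, hj⟩ := hrest
    subst hc; subst hj
    simp only [if_pos (show 0 < z by omega), fd2, md2, altMin, ge_iff_le, if_neg hq']
    rcases le_total X Y with hxy | hxy
    · rw [min_eq_left hxy, max_eq_right hxy]
      have hb : 0 < Y := by rw [max_eq_right hxy] at hD; exact hD
      exact fun h => leafT1 X Y z hxy hq hb hz2' (by simpa using h)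
    · rw [min_eq_right hxy, max_eq_left hxy]
      have hb : 0 < X := by rw [max_eq_left hxy] at hD; exact hD
      intro h
      rw [min_comm (min (fsw X Y (z - 1)) (fsw X Y (z - 2)))] at h
      exact leafT1 Y X z hxy (by omega) hb hz2' (by simpa using h)
  · -- last fixed character, even free tail, positive leaving cost
    obtain ⟨hf, hp, hrest⟩ := hInv
    subst hf
    have hcp : ∃ ch', L = some ch' := by
      cases L with
      | none => simp at hsh2
      | some ch' => exact ⟨ch', rfl⟩
    obtain ⟨ch', hL'⟩ := hcp
    subst hL'
    simp only [Option.map_some] at hsh2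
    have hp2 : p = if ch' = 'C' then (0 : Int) else 1 := Option.some.inj hsh2
    simp only [show (some ch' = (none : Option Char)) = False by simp, if_false,
               Option.some.injEq] at hD
    obtain ⟨he, hcp⟩ := hD
    rcases hp with hp | hp <;> subst hp
    · have hc' : ch' = 'C' := by
        by_contra hcc
        rw [if_neg hcc] at hp2
        exact absurd hp2 (by norm_num)
      subst hc'
      rw [if_pos rfl] at hcp
      rw [if_neg hq'] at hrest
      obtain ⟨hsp, hso⟩ := hrest
      subst hsp
      rw [if_neg (by omega : ¬ z = 0)] at hso
      subst hso
      simp only [if_pos (show 0 < z by omega), fd2, md2, altMin, ge_iff_le, if_neg hq',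
                 solveCost]
      norm_num
      rw [if_pos hcp]
      exact leafT2 X Y z res hq (by omega) (by omega) hcp
    · have hc' : ch' ≠ 'C' := by
        by_contra hcc
        rw [if_pos hcc] at hp2
        exact absurd hp2 (by norm_num)
      rw [if_neg hc'] at hcp
      rw [if_neg hq'] at hrest
      obtain ⟨hsp, hso⟩ := hrest
      subst hsp
      rw [if_neg (by omega : ¬ z = 0)] at hso
      subst hso
      simp only [if_pos (show 0 < z by omega), fd2, md2, altMin, ge_iff_le, if_neg hq',
                 solveCost]
      norm_num
      rw [if_pos hcp]
      intro h
      rw [min_comm, add_comm X Y] at h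
      exact leafT2 Y X z res (by omega) (by omega) (by omega) hcp h

-- ===== VERDICT (by name: the statement is the Claim_ definition above) =====
theorem solve_spec : Claim_unchanged_solve := by
  intro X Y S _ hD
  exact solve_spec_aux X Y S hD
theorem solve_changed : Claim_changed_solve := by unfold Claim_changed_solve; decide
theorem solve_tight : Claim_exact_solve := by
  intro X Y S _ hD
  exact solve_tight_aux X Y S hD
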